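-- pv_equiv track=rewrite | github.com/wjgoarxiv/autoconference-skill | examples/sii-hydrate-generation/render_snapshots.py | split_atoms
-- ===== SOURCE A (Python) =====
-- def split_atoms(atoms):
--     """
--     Split atoms into hydrate vs water sections.
--     Hydrate: all atoms before the first OW/HW1/HW2 atom.
--     Water:   OW, HW1, HW2 atoms (added water molecules).
--     """
--     hydrate = []
--     water = []
--     in_water = False
--     for a in atoms:
--         if a["atomname"] in ("OW", "HW1", "HW2"):
--             in_water = True
--         if in_water:
--             water.append(a)
--         else:
--             hydrate.append(a)
--     return hydrate, water
-- ===== SOURCE B (Python) =====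
-- def split_atoms(atoms):
--     """
--     Split atoms into hydrate vs water sections.
--     Hydrate: all atoms before the first OW/HW1/HW2 atom.
--     Water:   OW, HW1, HW2 atoms (added water molecules).
--     """
--     i = next((i for i, a in enumerate(atoms)
--               if a["atomname"] in ("OW", "HW1", "HW2")), len(atoms))
--     return atoms[:i], atoms[i:]
-- ===== Notes on version B (the rewrite author's own statement) =====
-- stated objective: simpler
-- what changed: B computes the index of the first water atom (OW/HW1/HW2) and returns two slices, instead of A's single pass maintaining an in_water flag and appending element by element.
import Mathlib
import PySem

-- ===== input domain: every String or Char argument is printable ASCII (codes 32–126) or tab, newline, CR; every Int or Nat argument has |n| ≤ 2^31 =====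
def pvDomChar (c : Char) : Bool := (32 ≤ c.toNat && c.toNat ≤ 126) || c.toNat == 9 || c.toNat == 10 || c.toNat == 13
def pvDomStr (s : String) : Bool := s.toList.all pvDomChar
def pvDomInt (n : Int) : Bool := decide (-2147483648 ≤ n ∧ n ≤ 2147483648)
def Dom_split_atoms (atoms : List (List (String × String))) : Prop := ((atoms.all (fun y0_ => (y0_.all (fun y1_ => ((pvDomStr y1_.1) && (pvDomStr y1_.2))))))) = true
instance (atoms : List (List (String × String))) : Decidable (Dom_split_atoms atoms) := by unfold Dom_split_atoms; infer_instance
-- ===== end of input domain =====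

-- B replaces A's in_water flag and per-element appends with find-first-water-index + two slices;
-- objective: simpler. Same return value on every input where A returns (Pre_ excludes KeyError inputs).

-- ===== PORT A =====
-- a["atomname"] : dict lookup; under Pre_ the key is present, so getD's default is never used.
def pvAtomName (a : List (String × String)) : String :=
  (PySem.Dict.mk a).getD "atomname" ""

-- the loop of A: state (hydrate, water, in_water)
def split_atoms.go (hydrate water : List (List (String × String))) (in_water : Bool) :
    List (List (String × String)) → (List (List (String × String))) × (List (List (String × String)))
  | [] => (hydrate, water)
  | a :: rest =>
    let in_water' := if (["OW", "HW1", "HW2"] : List String).contains (pvAtomName a) then true else in_water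
    if in_water' then split_atoms.go hydrate (water ++ [a]) in_water' rest
    else split_atoms.go (hydrate ++ [a]) water in_water' rest

def split_atoms (atoms : List (List (String × String))) : (List (List (String × String))) × (List (List (String × String))) :=
  split_atoms.go [] [] false atoms

-- ===== PORT B =====
-- next((i for i, a in enumerate(atoms) if a["atomname"] in (...)), len(atoms))
def pvWaterIdx : List (List (String × String)) → Nat
  | [] => 0
  | a :: rest =>
    if (["OW", "HW1", "HW2"] : List String).contains (pvAtomName a) then 0
    else pvWaterIdx rest + 1

def split_atoms_alt (atoms : List (List (String × String))) : (List (List (String × String))) × (List (List (String × String))) :=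
  let i := pvWaterIdx atoms
  (atoms.take i, atoms.drop i)

-- ===== PRECONDITION & SPEC =====
-- Pre_ excludes exactly the inputs where A raises KeyError: some atom dict lacks the "atomname" key.
def Pre_split_atoms (atoms : List (List (String × String))) : Prop :=
  ∀ a ∈ atoms, ((PySem.Dict.mk a).get? "atomname").isSome = true
instance (atoms : List (List (String × String))) : Decidable (Pre_split_atoms atoms) := by unfold Pre_split_atoms; infer_instance

def pvWitness_split_atoms : (List (List (String × String))) :=
  [[("atomname", "C1")], [("atomname", "OW")], [("atomname", "HW1")]]

def Spec_split_atoms (atoms : List (List (String × String))) (out : (List (List (String × String))) × (List (List (String × String)))) : Prop := out = split_atoms_alt atoms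
instance (atoms : List (List (String × String))) (out : (List (List (String × String))) × (List (List (String × String)))) : Decidable (Spec_split_atoms atoms out) := by unfold Spec_split_atoms; infer_instance

-- ===== CLAIM (what is proved, stated in full; the proofs are below) =====
def Claim_equal_split_atoms : Prop := ∀ (atoms : List (List (String × String))), Dom_split_atoms atoms → Pre_split_atoms atoms → Spec_split_atoms atoms (split_atoms atoms)

-- ===== LEMMAS AND PROOFS =====

-- once in_water is true, everything goes to water
theorem go_true (atoms : List (List (String × String))) :
    ∀ h w, split_atoms.go h w true atoms = (h, w ++ atoms) := by
  induction atoms with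
  | nil => intro h w; simp [split_atoms.go]
  | cons a rest ih =>
    intro h w
    simp only [split_atoms.go, if_pos, ite_self]
    rw [ih]
    simp

theorem go_false (atoms : List (List (String × String))) :
    ∀ h w, split_atoms.go h w false atoms =
      (h ++ atoms.take (pvWaterIdx atoms), w ++ atoms.drop (pvWaterIdx atoms)) := by
  induction atoms with
  | nil => intro h w; simp [split_atoms.go, pvWaterIdx]
  | cons a rest ih =>
    intro h w
    by_cases hc : (["OW", "HW1", "HW2"] : List String).contains (pvAtomName a) = true
    · simp only [split_atoms.go, pvWaterIdx, hc, if_true]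
      rw [go_true]
      simp
    · simp only [split_atoms.go, pvWaterIdx, hc, Bool.false_eq_true, if_false]
      rw [ih]
      simp

-- ===== VERDICT (by name: the statement is the Claim_ definition above) =====
theorem split_atoms_spec : Claim_equal_split_atoms := by
  intro atoms _ _
  unfold Spec_split_atoms split_atoms split_atoms_alt
  rw [go_false]
  simp
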